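-- pv_equiv track=rewrite | github.com/ZianConradie/WarEraCompanyOptimizer | main.py | optimize_eco
-- ===== SOURCE A (Python) =====
-- from collections import defaultdict
--
-- PRODUCT_RECIPES = {
--     # Ammo
--     "Light Ammo": {"Lead": 1},
--     "Medium Ammo": {"Lead": 1, "Steel": 1},
--     "Heavy Ammo": {"Lead": 1},
--     # Food
--     "Bread": {"Grain": 1},
--     "Steak": {"Livestock": 1},
--     "Cooked Fish": {"Fish": 1},
--     # Boost
--     "Pill": {"Mysterious Plant": 1},
--     # Money / Infrastructure
--     "Steel": {"Iron": 1},
--     "Concrete": {"Limestone": 1},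
-- }
--
-- MONEY_PRIORITY_PRODUCTS = ["Steel", "Concrete"]
--
-- def add_product_with_materials(plan, product):
--     """Add ONE unit of product AND ONE unit of each required raw material."""
--     plan[product] += 1
--     for req, amount in PRODUCT_RECIPES.get(product, {}).items():
--         plan[req] += amount
--
-- def optimize_eco(total_companies):
--     plan = defaultdict(int)
--     remaining_companies = total_companies
--
--     product_index = 0
--     while remaining_companies > 0:
--         cost = 2
--         if cost <= remaining_companies:
--             product = MONEY_PRIORITY_PRODUCTS[product_index]
--             add_product_with_materials(plan, product)
--             remaining_companies -= cost
--             # Alternate between products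
--             product_index = (product_index + 1) % len(MONEY_PRIORITY_PRODUCTS)
--         else:
--             break
--
--     return plan
-- ===== SOURCE B (Python) =====
-- def optimize_eco(total_companies):
--     # Closed form: the loop runs k = total_companies // 2 times, alternating
--     # Steel (with Iron) and Concrete (with Limestone), starting with Steel.
--     k = total_companies // 2 if total_companies > 0 else 0
--     steel = (k + 1) // 2
--     concrete = k // 2
--     plan = {}
--     if steel != 0:
--         plan["Steel"] = steel
--         plan["Iron"] = steel
--     if concrete != 0:
--         plan["Concrete"] = concrete
--         plan["Limestone"] = concrete
--     return plan
-- ===== Notes on version B (the rewrite author's own statement) =====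
-- stated objective: faster
-- what changed: Replaces the alternating while-loop (one dict update per purchased product) by a closed form: halve the company count to get the number of products, give Steel/Iron the ceiling half and Concrete/Limestone the floor half, and write the plan directly.
import Mathlib
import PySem

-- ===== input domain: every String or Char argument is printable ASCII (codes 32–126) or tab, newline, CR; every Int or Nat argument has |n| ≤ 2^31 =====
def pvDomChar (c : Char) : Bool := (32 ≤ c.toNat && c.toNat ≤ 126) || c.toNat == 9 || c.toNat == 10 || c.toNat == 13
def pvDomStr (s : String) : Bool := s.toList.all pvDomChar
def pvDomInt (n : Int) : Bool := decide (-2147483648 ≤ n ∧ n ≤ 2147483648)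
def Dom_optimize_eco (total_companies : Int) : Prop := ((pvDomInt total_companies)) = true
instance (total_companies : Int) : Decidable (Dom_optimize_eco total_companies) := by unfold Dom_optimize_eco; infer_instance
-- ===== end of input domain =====

-- B replaces A's alternating while-loop by a closed form (halve the company count into a product
-- count, split it as ceiling half Steel/Iron and floor half Concrete/Limestone); same returned dict.


-- ===== PORT A =====
def PRODUCT_RECIPES : PySem.Dict String (PySem.Dict String Int) :=
  PySem.Dict.ofList [
    ("Light Ammo", PySem.Dict.ofList [("Lead", 1)]),
    ("Medium Ammo", PySem.Dict.ofList [("Lead", 1), ("Steel", 1)]),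
    ("Heavy Ammo", PySem.Dict.ofList [("Lead", 1)]),
    ("Bread", PySem.Dict.ofList [("Grain", 1)]),
    ("Steak", PySem.Dict.ofList [("Livestock", 1)]),
    ("Cooked Fish", PySem.Dict.ofList [("Fish", 1)]),
    ("Pill", PySem.Dict.ofList [("Mysterious Plant", 1)]),
    ("Steel", PySem.Dict.ofList [("Iron", 1)]),
    ("Concrete", PySem.Dict.ofList [("Limestone", 1)])]

def MONEY_PRIORITY_PRODUCTS : List String := ["Steel", "Concrete"]

-- plan[product] += 1 (defaultdict(int)) = modify with default 0; then the recipe loop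
def add_product_with_materials (plan : PySem.Dict String Int) (product : String) :
    PySem.Dict String Int :=
  let plan := plan.modify product 0 (· + 1)
  (((PRODUCT_RECIPES.get? product).getD PySem.Dict.empty).items).foldl
    (fun pl rq => pl.modify rq.1 0 (· + rq.2)) plan

-- the while loop; .getD "" totalises the list index (product_index is always 0 or 1, in range)
def optimizeLoop (plan : PySem.Dict String Int) (remaining : Int) (product_index : Int) :
    PySem.Dict String Int :=
  if 0 < remaining then
    if 2 ≤ remaining then
      let product := (PySem.List.pyGet? MONEY_PRIORITY_PRODUCTS product_index).getD ""
      optimizeLoop (add_product_with_materials plan product) (remaining - 2)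
        (PySem.Int.mod (product_index + 1) 2)
    else plan
  else plan
termination_by remaining.toNat
decreasing_by omega

def optimize_eco (total_companies : Int) : List (String × Int) :=
  (optimizeLoop PySem.Dict.empty total_companies 0).items

-- ===== PORT B =====
def optimize_eco_alt (total_companies : Int) : List (String × Int) :=
  let k := if 0 < total_companies then PySem.Int.floordiv total_companies 2 else 0
  let steel := PySem.Int.floordiv (k + 1) 2
  let concrete := PySem.Int.floordiv k 2
  (if steel ≠ 0 then [("Steel", steel), ("Iron", steel)] else []) ++
    (if concrete ≠ 0 then [("Concrete", concrete), ("Limestone", concrete)] else [])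

-- ===== PRECONDITION & SPEC =====
def Spec_optimize_eco (total_companies : Int) (out : List (String × Int)) : Prop := out = optimize_eco_alt total_companies
instance (total_companies : Int) (out : List (String × Int)) : Decidable (Spec_optimize_eco total_companies out) := by unfold Spec_optimize_eco; infer_instance

-- ===== CLAIM (what is proved, stated in full; the proofs are below) =====
def Claim_equal_optimize_eco : Prop := ∀ (total_companies : Int), Dom_optimize_eco total_companies → Spec_optimize_eco total_companies (optimize_eco total_companies)

-- ===== LEMMAS AND PROOFS =====

-- the loop state: Steel/Iron entries (inserted first), then Concrete/Limestone
def Dst (s c : Int) : PySem.Dict String Int :=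
  PySem.Dict.mk ((if s = 0 then [] else [("Steel", s), ("Iron", s)]) ++
    (if c = 0 then [] else [("Concrete", c), ("Limestone", c)]))

lemma add_steel (c : Int) (hc : 0 ≤ c) :
    add_product_with_materials (Dst c c) "Steel" = Dst (c + 1) c := by
  rcases eq_or_lt_of_le hc with h | h
  · subst h
    decide
  · have h0 : c ≠ 0 := by omega
    have h1 : c + 1 ≠ 0 := by omega
    simp [add_product_with_materials, Dst, h0, h1, PRODUCT_RECIPES,
      PySem.Dict.ofList, PySem.Dict.get?, PySem.Dict.getD, PySem.Dict.items,
      PySem.Dict.modify, PySem.Dict.insert, PySem.Dict.contains, PySem.Dict.update, PySem.Dict.empty]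

lemma add_concrete (s c : Int) (hs : s ≠ 0) (hc : 0 ≤ c) :
    add_product_with_materials (Dst s c) "Concrete" = Dst s (c + 1) := by
  rcases eq_or_lt_of_le hc with h | h
  · subst h
    simp [add_product_with_materials, Dst, hs, PRODUCT_RECIPES,
      PySem.Dict.ofList, PySem.Dict.get?, PySem.Dict.getD, PySem.Dict.items,
      PySem.Dict.modify, PySem.Dict.insert, PySem.Dict.contains, PySem.Dict.update, PySem.Dict.empty]
  · have h0 : c ≠ 0 := by omega
    have h1 : c + 1 ≠ 0 := by omega
    simp [add_product_with_materials, Dst, hs, h0, h1, PRODUCT_RECIPES,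
      PySem.Dict.ofList, PySem.Dict.get?, PySem.Dict.getD, PySem.Dict.items,
      PySem.Dict.modify, PySem.Dict.insert, PySem.Dict.contains, PySem.Dict.update, PySem.Dict.empty]

-- closed form of the loop, for both phases (product_index 0 and 1)
lemma loop_closed (n : Nat) :
    (∀ c : Int, 0 ≤ c →
      optimizeLoop (Dst c c) (n : Int) 0 =
        Dst (c + ((n / 2 + 1) / 2 : Nat)) (c + ((n / 2) / 2 : Nat))) ∧
    (∀ c : Int, 0 ≤ c →
      optimizeLoop (Dst (c + 1) c) (n : Int) 1 =
        Dst (c + 1 + ((n / 2) / 2 : Nat)) (c + ((n / 2 + 1) / 2 : Nat))) := by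
  induction n using Nat.strong_induction_on with
  | _ n ih =>
    constructor
    · intro c hc
      by_cases h2 : n < 2
      · have hn2 : ¬ (2 ≤ (n : Int)) := by exact_mod_cast (by omega : ¬ (2 ≤ n))
        have e1 : (n / 2 + 1) / 2 = 0 := by omega
        have e2 : n / 2 / 2 = 0 := by omega
        rw [optimizeLoop]
        simp [hn2, e1, e2]
      · push_neg at h2
        have h0 : (0 : Int) < (n : Int) := by exact_mod_cast (by omega : 0 < n)
        have hle : (2 : Int) ≤ (n : Int) := by exact_mod_cast h2
        rw [optimizeLoop, if_pos h0, if_pos hle]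
        have hget : PySem.List.pyGet? MONEY_PRIORITY_PRODUCTS 0 = some "Steel" := by decide
        have hmod : PySem.Int.mod (0 + 1) 2 = 1 := by decide
        rw [hget, hmod]
        show optimizeLoop (add_product_with_materials (Dst c c) ((some "Steel").getD "")) ((n : Int) - 2) 1 = _
        rw [Option.getD_some, add_steel c hc]
        have hcast : (n : Int) - 2 = ((n - 2 : Nat) : Int) := by push_cast [h2]; ring
        rw [hcast, (ih (n - 2) (by omega)).2 c hc]
        congr 1 <;> push_cast <;> omega
    · intro c hc
      by_cases h2 : n < 2
      · have hn2 : ¬ (2 ≤ (n : Int)) := by exact_mod_cast (by omega : ¬ (2 ≤ n))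
        have e1 : (n / 2 + 1) / 2 = 0 := by omega
        have e2 : n / 2 / 2 = 0 := by omega
        rw [optimizeLoop]
        simp [hn2, e1, e2]
      · push_neg at h2
        have h0 : (0 : Int) < (n : Int) := by exact_mod_cast (by omega : 0 < n)
        have hle : (2 : Int) ≤ (n : Int) := by exact_mod_cast h2
        rw [optimizeLoop, if_pos h0, if_pos hle]
        have hget : PySem.List.pyGet? MONEY_PRIORITY_PRODUCTS 1 = some "Concrete" := by decide
        have hmod : PySem.Int.mod (1 + 1) 2 = 0 := by decide
        rw [hget, hmod]
        show optimizeLoop (add_product_with_materials (Dst (c + 1) c) ((some "Concrete").getD "")) ((n : Int) - 2) 0 = _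
        rw [Option.getD_some, add_concrete (c + 1) c (by omega) hc]
        have hcast : (n : Int) - 2 = ((n - 2 : Nat) : Int) := by push_cast [h2]; ring
        rw [hcast, (ih (n - 2) (by omega)).1 (c + 1) (by omega)]
        congr 1 <;> push_cast <;> omega

theorem optimize_eco_spec : Claim_equal_optimize_eco := by
  intro t _
  unfold Spec_optimize_eco optimize_eco
  by_cases ht : 0 < t
  · set n : Nat := t.toNat with hn
    have htn : t = (n : Int) := by omega
    have hempty : PySem.Dict.empty = Dst 0 0 := by decide
    rw [htn, hempty]
    have := (loop_closed n).1 0 le_rfl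
    rw [this]
    have hk : PySem.Int.floordiv (n : Int) 2 = ((n / 2 : Nat) : Int) := by
      exact_mod_cast PySem.Int.floordiv_natCast n 2
    have hs : PySem.Int.floordiv (((n / 2 : Nat) : Int) + 1) 2 = (((n / 2 + 1) / 2 : Nat) : Int) := by
      have : ((n / 2 : Nat) : Int) + 1 = ((n / 2 + 1 : Nat) : Int) := by push_cast; ring
      rw [this]; exact_mod_cast PySem.Int.floordiv_natCast (n / 2 + 1) 2
    have hc : PySem.Int.floordiv ((n / 2 : Nat) : Int) 2 = ((n / 2 / 2 : Nat) : Int) := by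
      exact_mod_cast PySem.Int.floordiv_natCast (n / 2) 2
    have ht' : (0 : Int) < (n : Int) := by omega
    simp only [optimize_eco_alt, if_pos ht', hk, hs, hc, Dst, zero_add]
    by_cases e1 : (n / 2 + 1) / 2 = 0 <;> by_cases e2 : n / 2 / 2 = 0 <;>
      simp [e1, e2, PySem.Dict.items]
  · rw [optimizeLoop, if_neg ht]
    have h1 : ¬ (0 : Int) < 1 / 2 + 1 → True := fun _ => trivial
    have hfd : PySem.Int.floordiv (0 + 1) 2 = 0 := by decide
    have hfd2 : PySem.Int.floordiv 0 2 = 0 := by decide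
    simp [optimize_eco_alt, ht, hfd, hfd2, PySem.Dict.empty, PySem.Dict.items]
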